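-- pv_equiv track=rewrite | github.com/caidevOficial/Python_Platzi | OOP_And_Algorithms/Simple_Exercises/f_x.py | f
-- ===== SOURCE A (Python) =====
-- def f(x):
--     response = 0
--
--     for i in range(1000):
--         response += 1
--
--     for i in range(x):
--         response += 1
--
--     for i in range(x):
--         for j in range(x):
--             response += 1
--             response += 1
--     return response
-- ===== SOURCE B (Python) =====
-- def f(x):
--     # closed form: 1000 + x + 2*x^2 increments for positive x, else 1000
--     if x > 0:
--         return 1000 + x + 2 * x * x
--     return 1000
-- ===== Notes on version B (the rewrite author's own statement) =====
-- stated objective: faster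
-- what changed: replaces the counting loops (one of them doubly nested over range(x)) by the closed-form formula 1000 + x + 2*x*x for x>0 and 1000 otherwise
import Mathlib
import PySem

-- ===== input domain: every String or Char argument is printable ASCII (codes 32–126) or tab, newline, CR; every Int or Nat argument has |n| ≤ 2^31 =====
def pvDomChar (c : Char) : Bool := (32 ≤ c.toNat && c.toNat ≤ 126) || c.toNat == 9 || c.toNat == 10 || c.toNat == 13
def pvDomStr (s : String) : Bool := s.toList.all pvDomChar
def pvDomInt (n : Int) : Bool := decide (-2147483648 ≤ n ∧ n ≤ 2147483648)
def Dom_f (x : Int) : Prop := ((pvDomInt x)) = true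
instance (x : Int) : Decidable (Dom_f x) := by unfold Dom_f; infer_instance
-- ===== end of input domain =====

-- B replaces A's counting loops by the O(1) closed form 1000 + x + 2*x*x (x > 0), else 1000.


-- ===== PORT A =====
def f (x : Int) : Int :=
  let response : Int := 0
  let response := (PySem.List.pyRange 0 1000 1).foldl (fun r _ => r + 1) response
  let response := (PySem.List.pyRange 0 x 1).foldl (fun r _ => r + 1) response
  let response := (PySem.List.pyRange 0 x 1).foldl
    (fun r _ => (PySem.List.pyRange 0 x 1).foldl (fun r _ => r + 1 + 1) r) response
  response

-- ===== PORT B =====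
def f_alt (x : Int) : Int :=
  if x > 0 then 1000 + x + 2 * x * x else 1000

-- ===== PRECONDITION & SPEC =====
def Spec_f (x : Int) (out : Int) : Prop := out = f_alt x
instance (x : Int) (out : Int) : Decidable (Spec_f x out) := by unfold Spec_f; infer_instance

-- ===== CLAIM (what is proved, stated in full; the proofs are below) =====
def Claim_equal_f : Prop := ∀ (x : Int), Dom_f x → Spec_f x (f x)

-- ===== LEMMAS AND PROOFS =====

theorem foldl_const_add (c : Int) (l : List Int) (r : Int) :
    l.foldl (fun r _ => r + c) r = r + c * l.length := by
  induction l generalizing r with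
  | nil => simp
  | cons a t ih => simp [List.foldl, ih]; ring

theorem f_closed (x : Int) :
    f x = 1000 + (x.toNat : Int) + 2 * (x.toNat : Int) * (x.toNat : Int) := by
  unfold f
  have h2 : (fun (r : Int) (_ : Int) => r + 1 + 1) = (fun (r : Int) (_ : Int) => r + 2) := by
    funext r _; ring
  rw [h2]
  have hin : (fun (r : Int) (_ : Int) => (PySem.List.pyRange 0 x 1).foldl (fun r _ => r + 2) r)
      = (fun (r : Int) (_ : Int) => r + 2 * ((x.toNat : Nat) : Int)) := by
    funext r _
    rw [foldl_const_add, PySem.List.length_pyRange_one, Int.sub_zero]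
  rw [hin]
  simp only [foldl_const_add, PySem.List.length_pyRange_one, Int.sub_zero]
  norm_num

-- ===== VERDICT (by name: the statement is the Claim_ definition above) =====
theorem f_spec : Claim_equal_f := by
  intro x _
  unfold Spec_f f_alt
  rw [f_closed]
  by_cases h : x > 0
  · rw [if_pos h, Int.toNat_of_nonneg (le_of_lt h)]
  · rw [if_neg h]
    have : x.toNat = 0 := by omega
    simp [this]
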